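-- pv_equiv track=rewrite | github.com/Atellane/NSI_2022_2023 | python/exercices/chapitre_4/exercice_4.py | validityTestScrabble
-- ===== SOURCE A (Python) =====
-- def validityTestScrabble(stringToTest: str) -> str :
-- 	voyelles: list = ["A", "E", "I", "O", "U", "Y"]
-- 	consonnes: list = [chr(i) for i in range(65,91) if chr(i) not in voyelles]
-- 	compteurVoyelles: int = 0
-- 	compteurConsonnes: int = 0
--
-- 	invalidBecauseOfLetters: str = f"Votre chaine {stringToTest} est invalide, elle ne peut contenir que des lettres :("
-- 	invalidBecauseOfLength: str = f"Votre chaine {stringToTest} est invalide, elle doit contenir au moins 7 lettres ;)"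
-- 	invalidBecauseOfVoyellesOrConsonnes: str = f"Votre chaine {stringToTest} est invalide, elle doit contenir au moins 2 consonnes et 2 voyelles :/"
-- 	valid: str = f"Votre chaine {stringToTest} est valide :)"
--
-- 	if len(stringToTest) >= 7 :
-- 		for i in stringToTest :
-- 			try :
-- 				int(i)
-- 				return invalidBecauseOfLetters
-- 			except ValueError :
-- 				for j in voyelles :
-- 					if i == j:
-- 						compteurVoyelles += 1
-- 				for j in consonnes:
-- 					if i == j:
-- 						compteurConsonnes += 1
-- 		if compteurVoyelles < 2 or compteurConsonnes < 2 :
-- 			return invalidBecauseOfVoyellesOrConsonnes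
-- 		else:
-- 			return valid
-- 	else:
-- 		return invalidBecauseOfLength
-- ===== SOURCE B (Python) =====
-- def validityTestScrabble(stringToTest: str) -> str:
--     invalidBecauseOfLetters = f"Votre chaine {stringToTest} est invalide, elle ne peut contenir que des lettres :("
--     invalidBecauseOfLength = f"Votre chaine {stringToTest} est invalide, elle doit contenir au moins 7 lettres ;)"
--     invalidBecauseOfVoyellesOrConsonnes = f"Votre chaine {stringToTest} est invalide, elle doit contenir au moins 2 consonnes et 2 voyelles :/"
--     valid = f"Votre chaine {stringToTest} est valide :)"
--
--     if len(stringToTest) < 7: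
--         return invalidBecauseOfLength
--     if any(c in "0123456789" for c in stringToTest):
--         return invalidBecauseOfLetters
--     counts = {}
--     for c in stringToTest:
--         counts[c] = counts.get(c, 0) + 1
--     vowels = sum(counts.get(v, 0) for v in "AEIOUY")
--     consonants = sum(counts.get(c, 0) for c in "BCDFGHJKLMNPQRSTVWXZ")
--     if vowels < 2 or consonants < 2:
--         return invalidBecauseOfVoyellesOrConsonnes
--     return valid
-- ===== Notes on version B (the rewrite author's own statement) =====
-- stated objective: faster
-- what changed: Replaced the per-character loop that tries int() (raising/handling a ValueError per char) and scans the 6-vowel and 20-consonant lists for every character by guard clauses: a digit membership pass, then one frequency dictionary built in a single pass with vowel/consonant totals summed over the fixed category strings.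
import Mathlib
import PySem

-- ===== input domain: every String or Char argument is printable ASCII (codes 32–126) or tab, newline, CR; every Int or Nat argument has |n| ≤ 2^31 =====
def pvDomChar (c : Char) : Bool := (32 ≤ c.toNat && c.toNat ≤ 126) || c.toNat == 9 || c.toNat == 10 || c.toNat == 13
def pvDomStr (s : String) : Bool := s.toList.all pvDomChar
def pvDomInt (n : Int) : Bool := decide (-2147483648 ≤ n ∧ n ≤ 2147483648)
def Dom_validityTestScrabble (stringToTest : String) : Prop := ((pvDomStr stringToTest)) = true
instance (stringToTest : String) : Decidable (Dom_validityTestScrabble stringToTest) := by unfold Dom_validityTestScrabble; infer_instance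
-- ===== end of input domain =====

-- B replaces A's single early-return loop (int() try per char + two inner list scans)
-- by guard clauses plus a frequency dictionary summed over the fixed vowel/consonant strings (idiomatic).


-- ===== PORT A =====
-- the for-loop with its early `return invalidBecauseOfLetters`; `int(i)` on the 1-char
-- string i is PySem.Int.ofChars? [i] (some = parses, none = ValueError)
def pvLoopA (invalidLetters invalidVC valid : String) (voyelles consonnes : List Char) :
    List Char → Int → Int → String
  | [], compteurVoyelles, compteurConsonnes =>
      if compteurVoyelles < 2 ∨ compteurConsonnes < 2 then invalidVC else valid
  | i :: rest, compteurVoyelles, compteurConsonnes =>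
      match PySem.Int.ofChars? [i] with
      | some _ => invalidLetters
      | none =>
          pvLoopA invalidLetters invalidVC valid voyelles consonnes rest
            (voyelles.foldl (fun a j => if i = j then a + 1 else a) compteurVoyelles)
            (consonnes.foldl (fun a j => if i = j then a + 1 else a) compteurConsonnes)

def validityTestScrabble (stringToTest : String) : String :=
  let voyelles : List Char := ['A', 'E', 'I', 'O', 'U', 'Y']
  let consonnes : List Char :=
    ((PySem.List.pyRange 65 91 1).map (fun i => Char.ofNat i.toNat)).filter
      (fun c => !voyelles.contains c)
  let invalidBecauseOfLetters : String :=
    "Votre chaine " ++ stringToTest ++ " est invalide, elle ne peut contenir que des lettres :("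
  let invalidBecauseOfLength : String :=
    "Votre chaine " ++ stringToTest ++ " est invalide, elle doit contenir au moins 7 lettres ;)"
  let invalidBecauseOfVoyellesOrConsonnes : String :=
    "Votre chaine " ++ stringToTest ++ " est invalide, elle doit contenir au moins 2 consonnes et 2 voyelles :/"
  let valid : String := "Votre chaine " ++ stringToTest ++ " est valide :)"
  if PySem.Str.len stringToTest ≥ 7 then
    pvLoopA invalidBecauseOfLetters invalidBecauseOfVoyellesOrConsonnes valid
      voyelles consonnes stringToTest.toList 0 0
  else
    invalidBecauseOfLength

-- ===== PORT B =====
def validityTestScrabble_alt (stringToTest : String) : String :=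
  let invalidBecauseOfLetters : String :=
    "Votre chaine " ++ stringToTest ++ " est invalide, elle ne peut contenir que des lettres :("
  let invalidBecauseOfLength : String :=
    "Votre chaine " ++ stringToTest ++ " est invalide, elle doit contenir au moins 7 lettres ;)"
  let invalidBecauseOfVoyellesOrConsonnes : String :=
    "Votre chaine " ++ stringToTest ++ " est invalide, elle doit contenir au moins 2 consonnes et 2 voyelles :/"
  let valid : String := "Votre chaine " ++ stringToTest ++ " est valide :)"
  if PySem.Str.len stringToTest < 7 then
    invalidBecauseOfLength
  else if stringToTest.toList.any (fun c => "0123456789".toList.contains c) then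
    invalidBecauseOfLetters
  else
    let counts : PySem.Dict Char Int :=
      stringToTest.toList.foldl (fun d c => d.modify c 0 (· + 1)) PySem.Dict.empty
    let vowels : Int := "AEIOUY".toList.foldl (fun a v => a + counts.getD v 0) 0
    let consonants : Int := "BCDFGHJKLMNPQRSTVWXZ".toList.foldl (fun a c => a + counts.getD c 0) 0
    if vowels < 2 ∨ consonants < 2 then invalidBecauseOfVoyellesOrConsonnes else valid

-- ===== PRECONDITION & SPEC =====
def Spec_validityTestScrabble (stringToTest : String) (out : String) : Prop := out = validityTestScrabble_alt stringToTest
instance (stringToTest : String) (out : String) : Decidable (Spec_validityTestScrabble stringToTest out) := by unfold Spec_validityTestScrabble; infer_instance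

-- ===== CLAIM (what is proved, stated in full; the proofs are below) =====
def Claim_equal_validityTestScrabble : Prop := ∀ (stringToTest : String), Dom_validityTestScrabble stringToTest → Spec_validityTestScrabble stringToTest (validityTestScrabble stringToTest)

-- ===== LEMMAS AND PROOFS =====

-- int(c) parses a single ASCII char exactly when it is one of '0'..'9'
lemma pv_digit_fin : ∀ n : Fin 127,
    (PySem.Int.ofChars? [Char.ofNat n]).isSome = ("0123456789".toList.contains (Char.ofNat n)) := by
  decide

lemma pv_digit_char (c : Char) (h : pvDomChar c = true) :
    (PySem.Int.ofChars? [c]).isSome = ("0123456789".toList.contains c) := by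
  have hlt : c.toNat < 127 := by
    simp [pvDomChar] at h
    omega
  have := pv_digit_fin ⟨c.toNat, hlt⟩
  simpa [Char.ofNat_toNat] using this

-- the inner `for j in ks: if i == j: a += 1` loop adds the indicator of membership (ks nodup)
lemma pv_foldl_indicator (i : Char) :
    ∀ (ks : List Char), ks.Nodup → ∀ (a : Int),
      ks.foldl (fun a j => if i = j then a + 1 else a) a
        = a + (if i ∈ ks then 1 else 0) := by
  intro ks
  induction ks with
  | nil => intro _ a; simp
  | cons k t ih =>
      intro hnd a
      rw [List.nodup_cons] at hnd
      rw [List.foldl_cons, ih hnd.2]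
      by_cases hik : i = k
      · subst hik
        simp [hnd.1]
      · simp [hik]

-- membership count against a nodup key list splits off the head key
lemma pv_filter_cons_split (k : Char) (t : List Char) (hk : k ∉ t) :
    ∀ l : List Char,
      (l.filter (fun c => decide (c ∈ k :: t))).length
        = l.count k + (l.filter (fun c => decide (c ∈ t))).length := by
  intro l
  induction l with
  | nil => simp
  | cons c l ih =>
      simp at ih
      by_cases hck : c = k
      · subst hck
        simp [List.count_cons, hk, ih]
        omega
      · by_cases hct : c ∈ t
        · simp [List.count_cons, hck, hct, ih]
          omega
        · simp [List.count_cons, hck, hct, ih]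

-- B's category sum Σ_{k∈ks} l.count k equals the membership count (ks nodup)
lemma pv_foldl_sum_counts (l : List Char) :
    ∀ (ks : List Char), ks.Nodup → ∀ (a : Int),
      ks.foldl (fun a k => a + (l.count k : Int)) a
        = a + ((l.filter (fun c => decide (c ∈ ks))).length : Int) := by
  intro ks
  induction ks with
  | nil => intro _ a; simp
  | cons k t ih =>
      intro hnd a
      rw [List.nodup_cons] at hnd
      rw [List.foldl_cons, ih hnd.2, pv_filter_cons_split k t hnd.1 l]
      push_cast
      ring

-- A's loop returns the letters message as soon as some character parses as an int
lemma pv_loopA_digit (mL mVC mV : String) (voy con : List Char) :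
    ∀ (l : List Char), (∀ c ∈ l, pvDomChar c = true) →
      (l.any (fun c => "0123456789".toList.contains c)) = true →
      ∀ cv cc, pvLoopA mL mVC mV voy con l cv cc = mL := by
  intro l
  induction l with
  | nil => intro _ h; simp at h
  | cons c t ih =>
      intro hdom hany cv cc
      by_cases hc : ("0123456789".toList.contains c) = true
      · have : (PySem.Int.ofChars? [c]).isSome = true := by
          rw [pv_digit_char c (hdom c (by simp))]; exact hc
        rcases Option.isSome_iff_exists.mp this with ⟨v, hv⟩
        simp [pvLoopA, hv]
      · have hnone : PySem.Int.ofChars? [c] = none := by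
          have h := pv_digit_char c (hdom c (by simp))
          simp only [Bool.not_eq_true] at hc
          rw [hc] at h
          exact Option.not_isSome_iff_eq_none.mp (by simp [h])
        have hany' : (t.any (fun c => "0123456789".toList.contains c)) = true := by
          simp only [Bool.not_eq_true] at hc
          simp only [List.any_cons, hc, Bool.false_or] at hany
          exact hany
        simp only [pvLoopA, hnone]
        exact ih (fun c hc => hdom c (by simp [hc])) hany' _ _

-- with no digit present, A's loop counts vowels and consonants by membership
lemma pv_loopA_nodigit (mL mVC mV : String) (voy con : List Char)
    (hvoy : voy.Nodup) (hcon : con.Nodup) :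
    ∀ (l : List Char), (∀ c ∈ l, pvDomChar c = true) →
      (l.any (fun c => "0123456789".toList.contains c)) = false →
      ∀ cv cc, pvLoopA mL mVC mV voy con l cv cc =
        if cv + ((l.filter (fun c => decide (c ∈ voy))).length : Int) < 2 ∨
           cc + ((l.filter (fun c => decide (c ∈ con))).length : Int) < 2
        then mVC else mV := by
  intro l
  induction l with
  | nil => intro _ _ cv cc; simp [pvLoopA]
  | cons c t ih =>
      intro hdom hany cv cc
      simp only [List.any_cons, Bool.or_eq_false_iff] at hany
      have hnone : PySem.Int.ofChars? [c] = none := by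
        have h := pv_digit_char c (hdom c (by simp))
        rw [hany.1] at h
        exact Option.not_isSome_iff_eq_none.mp (by simp [h])
      simp only [pvLoopA, hnone]
      rw [pv_foldl_indicator c voy hvoy, pv_foldl_indicator c con hcon,
        ih (fun c hc => hdom c (by simp [hc])) hany.2]
      refine if_congr ?_ rfl rfl
      by_cases hv : c ∈ voy <;> by_cases hcn : c ∈ con <;>
        simp [List.filter_cons, hv, hcn] <;> push_cast <;> omega

-- ===== VERDICT (by name: the statement is the Claim_ definition above) =====
theorem validityTestScrabble_spec : Claim_equal_validityTestScrabble := by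
  intro s hdom
  unfold Spec_validityTestScrabble
  unfold validityTestScrabble validityTestScrabble_alt
  have hdom' : ∀ c ∈ s.toList, pvDomChar c = true := by
    have h := hdom
    unfold Dom_validityTestScrabble pvDomStr at h
    simpa [List.all_eq_true] using h
  by_cases hlen : PySem.Str.len s ≥ 7
  · have hlen' : ¬ PySem.Str.len s < 7 := by omega
    rw [if_pos hlen, if_neg hlen']
    by_cases hany : (s.toList.any (fun c => "0123456789".toList.contains c)) = true
    · rw [pv_loopA_digit _ _ _ _ _ s.toList hdom' hany]
      rw [if_pos hany]
    · simp only [Bool.not_eq_true] at hany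
      have hcons :
          ((PySem.List.pyRange 65 91 1).map (fun i => Char.ofNat i.toNat)).filter
            (fun c => !(['A', 'E', 'I', 'O', 'U', 'Y'].contains c))
          = "BCDFGHJKLMNPQRSTVWXZ".toList := by decide
      have hvl : (['A', 'E', 'I', 'O', 'U', 'Y'] : List Char) = "AEIOUY".toList := by decide
      rw [hcons, hvl]
      rw [pv_loopA_nodigit _ _ _ _ _ (by decide) (by decide) s.toList hdom' hany]
      have hcounter := (PySem.Dict.counter_eq_foldl s.toList).symm
      have hvow : ("AEIOUY".toList.foldl
          (fun a v => a + (s.toList.foldl (fun d c => d.modify c 0 (· + 1)) PySem.Dict.empty).getD v 0) (0:Int))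
          = ((s.toList.filter (fun c => decide (c ∈ "AEIOUY".toList))).length : Int) := by
        rw [hcounter]
        have h1 : ("AEIOUY".toList.foldl (fun a v => a + (PySem.Dict.counter s.toList).getD v 0) (0:Int))
            = "AEIOUY".toList.foldl (fun a v => a + (s.toList.count v : Int)) (0:Int) := by
          apply PySem.List.foldl_congr_mem
          intro a v _
          rw [PySem.Dict.getD_counter]
        rw [h1, pv_foldl_sum_counts s.toList "AEIOUY".toList (by decide) 0]
        simp
      have hcon : ("BCDFGHJKLMNPQRSTVWXZ".toList.foldl
          (fun a v => a + (s.toList.foldl (fun d c => d.modify c 0 (· + 1)) PySem.Dict.empty).getD v 0) (0:Int))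
          = ((s.toList.filter (fun c => decide (c ∈ "BCDFGHJKLMNPQRSTVWXZ".toList))).length : Int) := by
        rw [hcounter]
        have h1 : ("BCDFGHJKLMNPQRSTVWXZ".toList.foldl (fun a v => a + (PySem.Dict.counter s.toList).getD v 0) (0:Int))
            = "BCDFGHJKLMNPQRSTVWXZ".toList.foldl (fun a v => a + (s.toList.count v : Int)) (0:Int) := by
          apply PySem.List.foldl_congr_mem
          intro a v _
          rw [PySem.Dict.getD_counter]
        rw [h1, pv_foldl_sum_counts s.toList "BCDFGHJKLMNPQRSTVWXZ".toList (by decide) 0]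
        simp
      simp only [hany, hvow, hcon, if_false, Bool.false_eq_true]
      norm_num
  · have hlen' : PySem.Str.len s < 7 := by omega
    rw [if_neg hlen, if_pos hlen']
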